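-- pv_equiv track=rewrite | github.com/bevenkyy/GITenberg9 | iPyGIRS/appUI/FormulaApplicationDialog.py | _include_char
-- ===== SOURCE A (Python) =====
-- def _include_char(string, chars):
--     '''
--     '''
--     is_include_char = False
--     #
--     for char in chars:
--         if char in string:
--             is_include_char = True
--             break
--         else:
--             is_include_char = False
--     #
--     return is_include_char
-- ===== SOURCE B (Python) =====
-- def _include_char(string, chars):
--     return bool(set(chars) & set(string))
-- ===== Notes on version B (the rewrite author's own statement) =====
-- stated objective: idiomatic
-- what changed: Replaced the explicit loop with early break by a single set-intersection test: bool(set(chars) & set(string)).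
import Mathlib
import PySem

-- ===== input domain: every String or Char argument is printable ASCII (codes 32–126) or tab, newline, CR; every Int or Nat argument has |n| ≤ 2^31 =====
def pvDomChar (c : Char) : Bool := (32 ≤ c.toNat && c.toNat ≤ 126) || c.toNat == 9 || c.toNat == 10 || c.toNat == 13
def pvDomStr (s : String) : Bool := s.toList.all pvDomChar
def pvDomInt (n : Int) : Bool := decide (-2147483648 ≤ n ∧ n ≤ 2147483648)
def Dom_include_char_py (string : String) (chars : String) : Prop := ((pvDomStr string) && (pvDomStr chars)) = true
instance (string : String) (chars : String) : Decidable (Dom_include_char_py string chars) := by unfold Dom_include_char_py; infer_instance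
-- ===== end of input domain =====

-- B replaces A's scan-with-early-break by one set-intersection test (idiomatic; same result).

-- ===== PORT A =====
-- the for-loop over chars with `break` on first hit, carrying is_include_char
def includeCharLoop (string : List Char) (rest : List Char) (acc : Bool) : Bool :=
  match rest with
  | [] => acc
  | c :: rest' =>
    if string.contains c then true
    else includeCharLoop string rest' false

def include_char_py (string : String) (chars : String) : Bool :=
  includeCharLoop string.toList chars.toList false

-- ===== PORT B =====
def include_char_py_alt (string : String) (chars : String) : Bool :=
  !(PySem.Set.inter (PySem.Set.ofList chars.toList) (PySem.Set.ofList string.toList)).isEmpty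

-- ===== PRECONDITION & SPEC =====
def Spec_include_char_py (string : String) (chars : String) (out : Bool) : Prop := out = include_char_py_alt string chars
instance (string : String) (chars : String) (out : Bool) : Decidable (Spec_include_char_py string chars out) := by unfold Spec_include_char_py; infer_instance

-- ===== CLAIM (what is proved, stated in full; the proofs are below) =====
def Claim_equal_include_char_py : Prop := ∀ (string : String) (chars : String), Dom_include_char_py string chars → Spec_include_char_py string chars (include_char_py string chars)

-- ===== LEMMAS AND PROOFS =====
theorem includeCharLoop_eq_any (string rest : List Char) :
    includeCharLoop string rest false = rest.any (fun c => string.contains c) := by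
  induction rest with
  | nil => rfl
  | cons c rest' ih =>
    simp [includeCharLoop, List.any_cons, ih]

theorem include_char_iff (string chars : String) :
    include_char_py string chars = true ↔ ∃ c ∈ chars.toList, c ∈ string.toList := by
  simp [include_char_py, includeCharLoop_eq_any, List.any_eq_true]

theorem include_char_alt_iff (string chars : String) :
    include_char_py_alt string chars = true ↔ ∃ c ∈ chars.toList, c ∈ string.toList := by
  unfold include_char_py_alt
  rw [Bool.not_eq_true', List.isEmpty_eq_false_iff]
  constructor
  · intro hne
    obtain ⟨c, hc⟩ := List.exists_mem_of_ne_nil _ hne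
    have := (PySem.Set.mem_inter _ _ _).1 hc
    exact ⟨c, (PySem.Set.mem_ofList _ _).1 this.1, (PySem.Set.mem_ofList _ _).1 this.2⟩
  · rintro ⟨c, h1, h2⟩
    exact List.ne_nil_of_mem ((PySem.Set.mem_inter _ _ _).2 ⟨(PySem.Set.mem_ofList _ _).2 h1, (PySem.Set.mem_ofList _ _).2 h2⟩)

-- ===== VERDICT (by name: the statement is the Claim_ definition above) =====
theorem include_char_py_spec : Claim_equal_include_char_py := by
  intro string chars _
  unfold Spec_include_char_py
  rw [Bool.eq_iff_iff, include_char_iff, include_char_alt_iff]
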